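-- pv_equiv track=rewrite | github.com/EleutherAI/semantic-memorization | ajnovice/Increment_Sequence.py | __count_increasing_sequences
-- ===== SOURCE A (Python) =====
-- def __count_increasing_sequences(seq):
--     try:
--         count = 0
--         i = 0
--         while i < len(seq):
--             j = i + 1
--             while j < len(seq) and str(seq[j]) > str(seq[j - 1]):
--                 j += 1
--             if j - i > 1:
--                 count += 1
--             i = j
--         return count
--     except:
--         return 0
-- ===== SOURCE B (Python) =====
-- def __count_increasing_sequences(seq):
--     try:
--         count = 0
--         prev = False
--         for i in range(1, len(seq)):
--             asc = str(seq[i]) > str(seq[i - 1])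
--             if asc and not prev:
--                 count += 1
--             prev = asc
--         return count
--     except:
--         return 0
-- ===== Notes on version B (the rewrite author's own statement) =====
-- stated objective: simpler
-- what changed: Replaces the nested pointer-jump scan over maximal runs by a single flat pass that counts rising edges of the adjacent string-comparison sequence (a run starts exactly where asc becomes true after false).
import Mathlib
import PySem

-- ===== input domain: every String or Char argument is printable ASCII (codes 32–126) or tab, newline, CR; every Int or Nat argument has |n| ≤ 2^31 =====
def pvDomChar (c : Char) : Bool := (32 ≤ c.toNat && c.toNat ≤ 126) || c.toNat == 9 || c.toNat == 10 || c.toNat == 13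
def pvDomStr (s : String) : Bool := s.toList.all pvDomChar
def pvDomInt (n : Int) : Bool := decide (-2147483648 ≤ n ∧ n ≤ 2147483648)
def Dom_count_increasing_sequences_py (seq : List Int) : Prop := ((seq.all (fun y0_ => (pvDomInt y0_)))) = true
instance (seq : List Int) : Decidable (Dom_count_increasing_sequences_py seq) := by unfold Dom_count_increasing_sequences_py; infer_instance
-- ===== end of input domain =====

-- B replaces A's nested pointer-jump scan over maximal runs by one flat pass counting
-- rising edges of the adjacent string-comparison sequence (objective: simpler).

-- shared helper: the adjacent test str(seq[k]) > str(seq[k-1]) both Pythons write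
-- (indices are only used under the guard k < len, where getD's default is never taken)
def pvAsc (seq : List Int) (k : Nat) : Bool :=
  decide (PySem.Int.toStr (seq.getD (k - 1) 0) < PySem.Int.toStr (seq.getD k 0))

-- ===== PORT A =====
-- inner while: j advances while j < len(seq) and str(seq[j]) > str(seq[j-1])
def pvInnerA (seq : List Int) (j : Nat) : Nat :=
  if h : j < seq.length ∧ pvAsc seq j = true then pvInnerA seq (j + 1) else j
termination_by seq.length - j
decreasing_by omega

theorem le_pvInnerA (seq : List Int) (j : Nat) : j ≤ pvInnerA seq j := by
  fun_induction pvInnerA with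
  | case1 j h ih => omega
  | case2 j h => omega

-- outer while over i, jumping to the end j of each maximal run
def pvOuterA (seq : List Int) (i : Nat) : Int :=
  if h : i < seq.length then
    let j := pvInnerA seq (i + 1)
    (if 1 < j - i then (1 : Int) else 0) + pvOuterA seq j
  else 0
termination_by seq.length - i
decreasing_by
  have := le_pvInnerA seq (i + 1)
  omega

def count_increasing_sequences_py (seq : List Int) : Int := pvOuterA seq 0

-- ===== PORT B =====
-- for i in range(1, len(seq)): count rising edges of asc, carrying prev
def pvScanB (seq : List Int) (k : Nat) (prev : Bool) (count : Int) : Int :=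
  if h : k < seq.length then
    let asc := pvAsc seq k
    pvScanB seq (k + 1) asc (if asc && !prev then count + 1 else count)
  else count
termination_by seq.length - k
decreasing_by omega

def count_increasing_sequences_py_alt (seq : List Int) : Int := pvScanB seq 1 false 0

-- ===== PRECONDITION & SPEC =====
def Spec_count_increasing_sequences_py (seq : List Int) (out : Int) : Prop := out = count_increasing_sequences_py_alt seq
instance (seq : List Int) (out : Int) : Decidable (Spec_count_increasing_sequences_py seq out) := by unfold Spec_count_increasing_sequences_py; infer_instance

-- ===== CLAIM (what is proved, stated in full; the proofs are below) =====
def Claim_equal_count_increasing_sequences_py : Prop := ∀ (seq : List Int), Dom_count_increasing_sequences_py seq → Spec_count_increasing_sequences_py seq (count_increasing_sequences_py seq)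

-- ===== LEMMAS AND PROOFS =====

-- accumulator lemma for B's scan
theorem pvScanB_acc (seq : List Int) (k : Nat) (prev : Bool) (c : Int) :
    pvScanB seq k prev c = c + pvScanB seq k prev 0 := by
  by_cases h : k < seq.length
  · conv_lhs => rw [pvScanB]
    conv_rhs => rw [pvScanB]
    simp only [dif_pos h]
    rw [pvScanB_acc seq (k + 1) (pvAsc seq k) (if pvAsc seq k && !prev then c + 1 else c),
        pvScanB_acc seq (k + 1) (pvAsc seq k) (if pvAsc seq k && !prev then (0 : Int) + 1 else 0)]
    split <;> ring
  · conv_lhs => rw [pvScanB]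
    conv_rhs => rw [pvScanB]
    simp [h]
termination_by seq.length - k
decreasing_by all_goals omega

theorem pvInnerA_stop (seq : List Int) (j : Nat) (h : ¬ (j < seq.length ∧ pvAsc seq j = true)) :
    pvInnerA seq j = j := by rw [pvInnerA]; simp [h]

theorem pvInnerA_step (seq : List Int) (j : Nat) (h : j < seq.length ∧ pvAsc seq j = true) :
    pvInnerA seq j = pvInnerA seq (j + 1) := by rw [pvInnerA]; simp [h]

-- main invariant: A's run-jump loop from i equals B's edge-count scan from i+1 with prev=false,
-- and inside a run (prev=true) B's scan adds exactly A's count from the run's end.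
theorem pv_main (seq : List Int) : ∀ (d i : Nat), seq.length - i ≤ d →
    (i < seq.length → pvOuterA seq i = pvScanB seq (i + 1) false 0) ∧
    (∀ c : Int, pvScanB seq i true c = c + pvOuterA seq (pvInnerA seq i)) := by
  intro d
  induction d with
  | zero =>
    intro i hd
    have hge : seq.length ≤ i := by omega
    constructor
    · intro h; omega
    · intro c
      rw [pvScanB]; simp only [dif_neg (by omega : ¬ i < seq.length)]
      rw [pvInnerA_stop seq i (by omega)]
      rw [pvOuterA]; simp only [dif_neg (by omega : ¬ i < seq.length)]
      ring
  | succ d ih =>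
    intro i hd
    have part1 : i < seq.length → pvOuterA seq i = pvScanB seq (i + 1) false 0 := by
      intro h
      rw [pvOuterA]; simp only [dif_pos h]
      by_cases h1 : i + 1 < seq.length
      · by_cases hA : pvAsc seq (i + 1) = true
        · -- a run begins at i
          have hj : pvInnerA seq (i + 1) = pvInnerA seq (i + 2) := pvInnerA_step seq (i + 1) ⟨h1, hA⟩
          have hge : i + 2 ≤ pvInnerA seq (i + 2) := le_pvInnerA seq (i + 2)
          rw [pvScanB]; simp only [dif_pos h1, hA]
          simp only [hj, if_pos (by omega : 1 < pvInnerA seq (i + 2) - i)]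
          have hIH := (ih (i + 2) (by omega)).2 ((0 : Int) + 1)
          norm_num at hIH ⊢
          rw [show i + 1 + 1 = i + 2 from rfl, hIH]
        · -- comparison fails immediately: no run at i
          have hB : pvAsc seq (i + 1) = false := by simpa using hA
          have hj : pvInnerA seq (i + 1) = i + 1 := pvInnerA_stop seq (i + 1) (by simp [hB])
          rw [pvScanB]; simp only [dif_pos h1, hB]
          simp only [hj, if_neg (by omega : ¬ (1 < i + 1 - i))]
          have hIH := (ih (i + 1) (by omega)).1 h1
          norm_num
          rw [show i + 1 + 1 = i + 2 from rfl] at hIH ⊢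
          rw [hIH]
      · -- i is the last index
        have hj : pvInnerA seq (i + 1) = i + 1 := pvInnerA_stop seq (i + 1) (by omega)
        rw [pvScanB]; simp only [dif_neg h1]
        simp only [hj, if_neg (by omega : ¬ (1 < i + 1 - i))]
        rw [pvOuterA]; simp only [dif_neg h1]
        ring
    refine ⟨part1, ?_⟩
    intro c
    by_cases h : i < seq.length
    · by_cases hA : pvAsc seq i = true
      · -- still inside the run
        rw [pvScanB]; simp only [dif_pos h, hA]
        rw [pvInnerA_step seq i ⟨h, hA⟩]
        have := (ih (i + 1) (by omega)).2 c
        simpa using this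
      · -- run ends at i: prev becomes false, A restarts at i
        have hB : pvAsc seq i = false := by simpa using hA
        rw [pvScanB]; simp only [dif_pos h, hB]
        norm_num
        rw [pvInnerA_stop seq i (by simp [hB])]
        rw [pvScanB_acc seq (i + 1) false c]
        rw [← part1 h]
    · rw [pvScanB]; simp only [dif_neg h]
      rw [pvInnerA_stop seq i (by simp [h])]
      rw [pvOuterA]; simp only [dif_neg h]
      ring

-- ===== VERDICT (by name: the statement is the Claim_ definition above) =====
theorem count_increasing_sequences_py_spec : Claim_equal_count_increasing_sequences_py := by
  intro seq _
  unfold Spec_count_increasing_sequences_py count_increasing_sequences_py count_increasing_sequences_py_alt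
  by_cases h : 0 < seq.length
  · exact (pv_main seq seq.length 0 (by omega)).1 h
  · rw [pvOuterA]; simp only [dif_neg h]
    rw [pvScanB]; simp only [dif_neg (by omega : ¬ 1 < seq.length)]
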